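-- pv_equiv track=rewrite | github.com/perez182/ejercicios-python | uri1248.py | plan_dieta
-- ===== SOURCE A (Python) =====
-- def plan_dieta(comidas):
--     '''Diccionario que contiene los tipos de alimentos que debes comer(Letras) {letra:1}'''
--     plan=dict.fromkeys(comidas[0],1)
--     trampa=False
--     '''
--         Iteramos las letras para el desayuno y el almuerzo
--         para cada caso si la letra se encuentra en el diccionario
--         reducimos un entero a su valor.
--     '''
--     for i in range(1,3):
--         for alimento in comidas[i]:
--             if alimento in plan:
--                 plan[alimento]-=1
--                 ''' Si comiste mas de una vez un tipo de alimento trampa=True'''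
--                 if plan[alimento]<0:
--                     trampa=True
--                 '''Si comiste un alimento que nono esta en en el plan, trampa=True'''
--             else:
--                 trampa=True
--
--     if(trampa==True):
--         return "CHEATER"
--     else:
--         cadena=""
--         for alimento in sorted(list(plan.keys())):
--             if plan[alimento]==1:
--                 cadena+=alimento
--         return cadena
-- ===== SOURCE B (Python) =====
-- def plan_dieta(comidas):
--     # Sort-and-merge: walk the sorted distinct plan letters and the sorted
--     # combined meals in lockstep with two pointers.
--     plan = sorted(set(comidas[0]))
--     eaten = sorted(comidas[1] + comidas[2])
--     res = []
--     j = 0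
--     for c in plan:
--         if j < len(eaten) and eaten[j] < c:
--             return "CHEATER"  # ate a letter smaller than any remaining plan letter
--         if j < len(eaten) and eaten[j] == c:
--             j += 1
--             if j < len(eaten) and eaten[j] == c:
--                 return "CHEATER"  # ate a plan letter twice
--         else:
--             res.append(c)
--     if j < len(eaten):
--         return "CHEATER"  # ate a letter not in the plan
--     return "".join(res)
-- ===== Notes on version B (the rewrite author's own statement) =====
-- stated objective: alternative
-- what changed: Replaces A's interleaved decrement-a-dict-and-flag loop with a sort-and-merge: the sorted distinct plan letters and the sorted combined meals are walked in lockstep with two pointers, detecting cheating and collecting leftovers in one merge.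
import Mathlib
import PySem

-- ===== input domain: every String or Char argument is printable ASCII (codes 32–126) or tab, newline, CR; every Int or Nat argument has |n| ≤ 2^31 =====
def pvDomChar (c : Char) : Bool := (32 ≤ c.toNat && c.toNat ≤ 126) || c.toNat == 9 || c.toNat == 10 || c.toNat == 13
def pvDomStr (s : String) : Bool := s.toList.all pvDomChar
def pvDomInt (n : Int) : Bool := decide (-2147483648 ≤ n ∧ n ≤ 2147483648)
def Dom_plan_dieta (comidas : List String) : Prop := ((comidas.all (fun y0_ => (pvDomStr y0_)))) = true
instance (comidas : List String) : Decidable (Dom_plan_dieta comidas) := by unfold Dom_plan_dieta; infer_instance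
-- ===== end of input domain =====

-- B replaces A's interleaved decrement-a-dict-and-flag loop by a sort-and-merge: sorted distinct
-- plan letters and the sorted combined meals are walked in lockstep with two pointers (objective: alternative).

-- ===== PORT A =====
def plan_dieta (comidas : List String) : String :=
  -- plan = dict.fromkeys(comidas[0], 1)
  let plan0 : PySem.Dict Char Int :=
    (PySem.List.pyGetD comidas 0 "").toList.foldl (fun d c => d.insert c 1) PySem.Dict.empty
  -- for i in range(1,3): for alimento in comidas[i]: …
  let st : PySem.Dict Char Int × Bool :=
    (PySem.List.pyRange 1 3 1).foldl
      (fun st i =>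
        (PySem.List.pyGetD comidas i "").toList.foldl
          (fun (st : PySem.Dict Char Int × Bool) c =>
            if st.1.contains c then
              let d' := st.1.modify c 0 (· - 1)
              (d', if d'.getD c 0 < 0 then true else st.2)
            else (st.1, true))
          st)
      (plan0, false)
  if st.2 then "CHEATER"
  else
    -- cadena accumulation over sorted(plan.keys()), built on the char-list side
    String.ofList ((PySem.List.sorted st.1.keys (fun x => x) false).foldl
      (fun cad c => if st.1.getD c 0 == 1 then cad ++ [c] else cad) [])

-- ===== PORT B =====
-- the 'for c in plan' two-pointer loop of Source B, with its early 'return "CHEATER"' as none,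
-- the remaining eaten suffix as the second argument and res as the accumulator
def pvMergeB : List Char → List Char → List Char → Option (List Char)
  | [], e, acc => if e.isEmpty then some acc else none
  | c :: ps, [], acc => pvMergeB ps [] (acc ++ [c])
  | c :: ps, d :: es, acc =>
      if d < c then none
      else if d = c then
        (match es with
         | d2 :: _ => if d2 = c then none else pvMergeB ps es acc
         | [] => pvMergeB ps [] acc)
      else pvMergeB ps (d :: es) (acc ++ [c])

def plan_dieta_alt (comidas : List String) : String :=
  let plan : List Char :=
    PySem.List.sorted (PySem.Set.ofList (PySem.List.pyGetD comidas 0 "").toList) (fun x => x) false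
  let eaten : List Char :=
    PySem.List.sorted ((PySem.List.pyGetD comidas 1 "").toList ++ (PySem.List.pyGetD comidas 2 "").toList)
      (fun x => x) false
  match pvMergeB plan eaten [] with
  | none => "CHEATER"
  | some res => String.ofList res

-- ===== PRECONDITION & SPEC =====
-- Pre_ excludes exactly the inputs where Python A raises IndexError (fewer than 3 meal strings).
def Pre_plan_dieta (comidas : List String) : Prop := 3 ≤ comidas.length
instance (comidas : List String) : Decidable (Pre_plan_dieta comidas) := by unfold Pre_plan_dieta; infer_instance
def pvWitness_plan_dieta : List String := ["ABC", "A", "C"]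

def Spec_plan_dieta (comidas : List String) (out : String) : Prop := out = plan_dieta_alt comidas
instance (comidas : List String) (out : String) : Decidable (Spec_plan_dieta comidas out) := by unfold Spec_plan_dieta; infer_instance

-- ===== CLAIM (what is proved, stated in full; the proofs are below) =====
def Claim_equal_plan_dieta : Prop := ∀ (comidas : List String), Dom_plan_dieta comidas → Pre_plan_dieta comidas → Spec_plan_dieta comidas (plan_dieta comidas)

-- ===== LEMMAS AND PROOFS =====

-- dict.fromkeys(p, 1): value lookup
theorem fromkeys_getD (l : List Char) : ∀ (d : PySem.Dict Char Int) (x : Char),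
    (l.foldl (fun d c => d.insert c 1) d).getD x 0 = if x ∈ l then 1 else d.getD x 0 := by
  induction l with
  | nil => intro d x; simp
  | cons c l ih =>
    intro d x
    simp only [List.foldl_cons, ih, PySem.Dict.getD_insert, List.mem_cons]
    by_cases hx : x = c <;> by_cases hm : x ∈ l <;> simp [hx, hm]

theorem loop_spec (p : List Char) (l : List Char) : ∀ (d : PySem.Dict Char Int) (t : Bool),
    (∀ x, d.contains x = decide (x ∈ p)) →
    (∀ x, (l.foldl
        (fun (st : PySem.Dict Char Int × Bool) c =>
          if st.1.contains c then
            (st.1.modify c 0 (· - 1), if (st.1.modify c 0 (· - 1)).getD c 0 < 0 then true else st.2)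
          else (st.1, true)) (d, t)).1.getD x 0
        = d.getD x 0 - (if x ∈ p then (l.count x : Int) else 0)) ∧
    (l.foldl
        (fun (st : PySem.Dict Char Int × Bool) c =>
          if st.1.contains c then
            (st.1.modify c 0 (· - 1), if (st.1.modify c 0 (· - 1)).getD c 0 < 0 then true else st.2)
          else (st.1, true)) (d, t)).1.keys = d.keys ∧
    (l.foldl
        (fun (st : PySem.Dict Char Int × Bool) c =>
          if st.1.contains c then
            (st.1.modify c 0 (· - 1), if (st.1.modify c 0 (· - 1)).getD c 0 < 0 then true else st.2)
          else (st.1, true)) (d, t)).2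
      = (t || l.any (fun c => if c ∈ p then decide (d.getD c 0 - (l.count c : Int) < 0) else true)) := by
  induction l with
  | nil => intro d t h; refine ⟨fun x => by simp, rfl, by simp⟩
  | cons c l ih =>
    intro d t h
    by_cases hc : c ∈ p
    · have hcon : d.contains c = true := by rw [h]; simp [hc]
      simp only [List.foldl_cons, hcon, if_true]
      set d1 := d.modify c 0 (· - 1) with hd1
      have hd1g : ∀ x, d1.getD x 0 = if x = c then d.getD c 0 - 1 else d.getD x 0 := by
        intro x; rw [hd1, PySem.Dict.getD_modify]
      have h1 : ∀ x, d1.contains x = decide (x ∈ p) := by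
        intro x; rw [hd1, PySem.Dict.contains_modify]
        by_cases hx : x = c <;> simp [hx, h, hc]
      obtain ⟨hg, hk, hb⟩ := ih d1 (if d1.getD c 0 < 0 then true else t) h1
      refine ⟨?_, ?_, ?_⟩
      · intro x
        rw [hg x, hd1g x]
        by_cases hx : x = c
        · subst hx; simp only [if_pos hc, List.count_cons_self]; push_cast; ring
        · rw [if_neg hx, List.count_cons_of_ne (Ne.symm hx)]
      · rw [hk, hd1, PySem.Dict.keys_modify]
        exact PySem.Dict.keys_insert_of_contains _ _ hcon
      · rw [hb]
        have hcongr : (l.any (fun e => if e ∈ p then decide (d1.getD e 0 - (l.count e : Int) < 0) else true))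
            = l.any (fun e => if e ∈ p then decide (d.getD e 0 - ((c :: l).count e : Int) < 0) else true) := by
          apply PySem.List.any_congr_mem
          intro e he
          rw [hd1g e]
          by_cases hx : e = c
          · subst hx
            simp only [if_pos hc, List.count_cons_self, decide_eq_decide]
            push_cast; omega
          · rw [if_neg hx, List.count_cons_of_ne (Ne.symm hx)]
        rw [hcongr, hd1g c, if_pos rfl]
        simp only [List.any_cons, if_pos hc, List.count_cons_self]
        cases t with
        | true => simp
        | false =>
          simp only [Bool.false_or]
          by_cases hA : d.getD c 0 - 1 < 0
          · have hA2 : d.getD c 0 - ((l.count c : Int) + 1) < 0 := by omega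
            have : ((l.count c + 1 : Nat) : Int) = (l.count c : Int) + 1 := by push_cast; ring
            simp [hA, this, hA2]
          · by_cases hB : d.getD c 0 - ((l.count c : Int) + 1) < 0
            · have hcl : c ∈ l := List.count_pos_iff.mp (by omega)
              have hcast : ((l.count c + 1 : Nat) : Int) = (l.count c : Int) + 1 := by push_cast; ring
              simp [hA, hB, hcast]
              exact ⟨c, hcl, Or.inr (by simp only [List.count_cons_self]; push_cast; omega)⟩
            · have : ((l.count c + 1 : Nat) : Int) = (l.count c : Int) + 1 := by push_cast; ring
              simp [hA, this, hB]
    · have hcon : d.contains c = false := by rw [h]; simp [hc]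
      simp only [List.foldl_cons, hcon, Bool.false_eq_true, if_false]
      obtain ⟨hg, hk, hb⟩ := ih d true h
      refine ⟨?_, hk, ?_⟩
      · intro x
        rw [hg x]
        by_cases hx : x ∈ p
        · have hxc : x ≠ c := fun e => hc (e ▸ hx)
          rw [if_pos hx, if_pos hx, List.count_cons_of_ne (Ne.symm hxc)]
        · rw [if_neg hx, if_neg hx]
      · rw [hb]; simp [hc]

-- the two-pointer merge on a strictly increasing plan and a sorted eaten list computes
-- exactly "cheater or the unused plan letters"
theorem mergeB_spec : ∀ (P : List Char), P.Pairwise (· < ·) → ∀ (E acc : List Char), E.Pairwise (· ≤ ·) →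
    pvMergeB P E acc =
      if (E.any (fun e => !P.contains e) || P.any (fun c => decide (2 ≤ E.count c))) = true
      then none else some (acc ++ P.filter (fun c => !E.contains c)) := by
  intro P
  induction P with
  | nil =>
    intro _ E acc _
    cases E <;> simp [pvMergeB]
  | cons c ps ih =>
    intro hP E acc hE
    have hclt : ∀ x ∈ ps, c < x := fun x hx => (List.pairwise_cons.mp hP).1 x hx
    have hps : ps.Pairwise (· < ·) := (List.pairwise_cons.mp hP).2
    cases E with
    | nil =>
      have := ih hps [] (acc ++ [c]) List.Pairwise.nil
      simp only [pvMergeB, this]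
      simp
    | cons d es =>
      have hdle : ∀ x ∈ es, d ≤ x := fun x hx => (List.pairwise_cons.mp hE).1 x hx
      have hes : es.Pairwise (· ≤ ·) := (List.pairwise_cons.mp hE).2
      by_cases hdc : d < c
      · -- d not in plan at all
        have hdnot : (c :: ps).contains d = false := by
          simp only [List.contains_eq_mem, List.mem_cons, decide_eq_false_iff_not]
          rintro (rfl | hm)
          · exact lt_irrefl _ hdc
          · exact lt_asymm hdc (hclt d hm)
        have hcond : (((d :: es).any fun e => !(c :: ps).contains e) ||
            (c :: ps).any fun x => decide (2 ≤ List.count x (d :: es))) = true := by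
          simp only [List.any_cons, hdnot, Bool.not_false, Bool.true_or]
        rw [show pvMergeB (c :: ps) (d :: es) acc = none from by simp [pvMergeB, hdc], if_pos hcond]
      · by_cases hde : d = c
        · subst hde
          -- consumed one copy of d(= the plan head)
          by_cases h2 : ∃ d2 es', es = d2 :: es' ∧ d2 = d
          · obtain ⟨d2, es', rfl, rfl⟩ := h2
            have hcnt : 2 ≤ (d2 :: d2 :: es').count d2 := by
              simp
            have hcond : (((d2 :: d2 :: es').any fun e => !(d2 :: ps).contains e) ||
                (d2 :: ps).any fun x => decide (2 ≤ List.count x (d2 :: d2 :: es'))) = true := by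
              have : ((d2 :: ps).any fun x => decide (2 ≤ List.count x (d2 :: d2 :: es'))) = true := by
                simp only [List.any_cons]
                rw [show decide (2 ≤ List.count d2 (d2 :: d2 :: es')) = true from by simp]
                simp
              rw [this, Bool.or_true]
            rw [show pvMergeB (d2 :: ps) (d2 :: d2 :: es') acc = none from by simp [pvMergeB], if_pos hcond]
          · -- every remaining eaten letter is strictly above the consumed head
            have hgt : ∀ x ∈ es, d < x := by
              intro x hx
              rcases lt_or_eq_of_le (hdle x hx) with h | h
              · exact h
              · exfalso
                cases es with
                | nil => exact List.not_mem_nil hx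
                | cons d2 es' =>
                  apply h2
                  refine ⟨d2, es', rfl, ?_⟩
                  rcases List.mem_cons.mp hx with rfl | hx'
                  · exact h.symm
                  · have h1 := hdle d2 List.mem_cons_self
                    have h2' := (List.pairwise_cons.mp hes).1 x hx'
                    rw [← h] at h2'
                    exact le_antisymm h2' h1
            have heq : pvMergeB (d :: ps) (d :: es) acc = pvMergeB ps es acc := by
              cases es with
              | nil => simp [pvMergeB]
              | cons d2 es' =>
                have hne : ¬ d2 = d := fun h => lt_irrefl d (h ▸ hgt d2 List.mem_cons_self)
                simp [pvMergeB, hne]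
            rw [heq, ih hps es acc hes]
            have c1 : (es.any fun e => !ps.contains e) = ((d :: es).any fun e => !(d :: ps).contains e) := by
              rw [Bool.eq_iff_iff]
              simp only [List.any_eq_true, Bool.not_eq_true', List.contains_eq_mem,
                decide_eq_false_iff_not, List.mem_cons, not_or]
              constructor
              · rintro ⟨x, hx, hxps⟩
                exact ⟨x, Or.inr hx, fun h => lt_irrefl d (h ▸ hgt x hx), hxps⟩
              · rintro ⟨x, hx, hxd, hxps⟩
                rcases hx with rfl | hx
                · exact absurd rfl hxd
                · exact ⟨x, hx, hxps⟩
            have c2 : (ps.any fun x => decide (2 ≤ es.count x)) = ((d :: ps).any fun x => decide (2 ≤ (d :: es).count x)) := by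
              simp only [List.any_cons]
              have hd0 : (d :: es).count d = 1 := by
                have : es.count d = 0 := List.count_eq_zero.mpr (fun h => lt_irrefl d (hgt d h))
                simp [this]
              rw [hd0, show (decide (2 ≤ 1)) = false from by decide, Bool.false_or]
              apply PySem.List.any_congr_mem
              intro x hx
              have hxd : x ≠ d := fun h => lt_irrefl d (h ▸ hclt x hx)
              rw [List.count_cons_of_ne (Ne.symm hxd)]
            have c3 : ps.filter (fun x => !es.contains x) = (d :: ps).filter (fun x => !(d :: es).contains x) := by
              have hdin : ((!(d :: es).contains d)) = false := by simp
              rw [List.filter_cons, hdin]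
              simp only [Bool.false_eq_true, if_false]
              apply List.filter_congr
              intro x hx
              have hxd : ¬ x = d := fun h => lt_irrefl d (h ▸ hclt x hx)
              simp [List.contains_eq_mem, hxd]
            rw [c1, c2, c3]
        · -- c < d: plan letter c was not eaten
          have hcd : c < d := by
            rcases lt_trichotomy c d with h | h | h
            · exact h
            · exact absurd h.symm hde
            · exact absurd h hdc
          have heq : pvMergeB (c :: ps) (d :: es) acc = pvMergeB ps (d :: es) (acc ++ [c]) := by
            simp [pvMergeB, hdc, hde]
          rw [heq, ih hps (d :: es) (acc ++ [c]) hE]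
          have hgt : ∀ x ∈ (d :: es), c < x := by
            intro x hx
            rcases List.mem_cons.mp hx with rfl | hx'
            · exact hcd
            · exact lt_of_lt_of_le hcd (hdle x hx')
          have c1 : ((d :: es).any fun e => !ps.contains e) = ((d :: es).any fun e => !(c :: ps).contains e) := by
            apply PySem.List.any_congr_mem
            intro x hx
            have hxc : ¬ x = c := fun h => lt_irrefl c (h ▸ hgt x hx)
            simp [List.contains_eq_mem, hxc]
          have c2 : (ps.any fun x => decide (2 ≤ (d :: es).count x)) = ((c :: ps).any fun x => decide (2 ≤ (d :: es).count x)) := by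
            simp only [List.any_cons]
            have hc0 : (d :: es).count c = 0 :=
              List.count_eq_zero.mpr (fun h => lt_irrefl c (hgt c h))
            rw [hc0]
            simp
          have c3 : acc ++ [c] ++ ps.filter (fun x => !(d :: es).contains x)
              = acc ++ (c :: ps).filter (fun x => !(d :: es).contains x) := by
            have hcnot : ((!(d :: es).contains c)) = true := by
              simp only [List.contains_eq_mem, Bool.not_eq_true', decide_eq_false_iff_not]
              exact fun h => lt_irrefl c (hgt c h)
            rw [List.filter_cons, if_pos hcnot, List.append_assoc]
            rfl
          rw [c1, c2, c3]

-- ===== VERDICT (by name: the statement is the Claim_ definition above) =====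
theorem plan_dieta_spec : Claim_equal_plan_dieta := by
  intro comidas _ _
  unfold Spec_plan_dieta
  simp only [plan_dieta, plan_dieta_alt]
  have hr : PySem.List.pyRange 1 3 1 = [1, 2] := by decide
  rw [hr]
  simp only [List.foldl_cons, List.foldl_nil]
  simp only [← List.foldl_append]
  set p := (PySem.List.pyGetD comidas 0 "").toList with hp
  set L := (PySem.List.pyGetD comidas 1 "").toList ++ (PySem.List.pyGetD comidas 2 "").toList with hL
  set plan0 : PySem.Dict Char Int := p.foldl (fun d c => d.insert c 1) PySem.Dict.empty with hplan0
  have hkeys0 : plan0.keys = PySem.Set.ofList p := by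
    rw [hplan0, PySem.Dict.keys_foldl_insert (f := fun _ _ => (1 : Int))]
    rfl
  have hcont0 : ∀ x, plan0.contains x = decide (x ∈ p) := by
    intro x
    rw [PySem.Dict.contains_eq_decide_mem_keys, hkeys0]
    simp [PySem.Set.mem_ofList]
  have hget0 : ∀ x, plan0.getD x 0 = if x ∈ p then 1 else 0 := by
    intro x; rw [hplan0, fromkeys_getD, PySem.Dict.getD_empty]
  obtain ⟨hg, hk, hb⟩ := loop_spec p L plan0 false hcont0
  simp only [hb, Bool.false_or, hg, hk, hkeys0, hget0]
  -- names for B's sorted lists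
  set P := PySem.List.sorted (PySem.Set.ofList p) (fun x => x) false with hPdef
  set E := PySem.List.sorted L (fun x => x) false with hEdef
  have hPperm : P.Perm (PySem.Set.ofList p) := PySem.List.sorted_perm _ _ _
  have hEperm : E.Perm L := PySem.List.sorted_perm _ _ _
  have hPlt : P.Pairwise (· < ·) := PySem.List.sorted_ofList_pairwise_lt p
  have hEle : E.Pairwise (· ≤ ·) := PySem.List.sorted_pairwise L (fun x => x)
  have hmerge := mergeB_spec P hPlt E [] hEle
  -- the two cheater flags coincide
  have hflag : (L.any fun c => if c ∈ p then decide ((if c ∈ p then (1:Int) else 0) - (L.count c : Int) < 0) else true)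
      = ((E.any fun e => !P.contains e) || P.any (fun c => decide (2 ≤ E.count c))) := by
    rw [Bool.eq_iff_iff]
    simp only [List.any_eq_true, Bool.or_eq_true, Bool.not_eq_true', List.contains_eq_mem,
      decide_eq_false_iff_not, decide_eq_true_eq, hPperm.mem_iff, hEperm.mem_iff,
      PySem.Set.mem_ofList, hEperm.count_eq]
    constructor
    · rintro ⟨x, hxL, hcond⟩
      by_cases hxp : x ∈ p
      · rw [if_pos hxp, if_pos hxp, decide_eq_true_eq] at hcond
        exact Or.inr ⟨x, hxp, by omega⟩
      · exact Or.inl ⟨x, hxL, hxp⟩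
    · rintro (⟨x, hxL, hxp⟩ | ⟨x, hxp, hcnt⟩)
      · exact ⟨x, hxL, by rw [if_neg hxp]⟩
      · have hxL : x ∈ L := List.count_pos_iff.mp (by omega)
        exact ⟨x, hxL, by rw [if_pos hxp, if_pos hxp, decide_eq_true_eq]; omega⟩
  rw [hmerge]
  by_cases hch : ((E.any fun e => !P.contains e) || P.any (fun c => decide (2 ≤ E.count c))) = true
  · rw [hflag, hch]
    simp
  · rw [hflag]
    simp only [hch]
    simp only [Bool.false_eq_true, if_false]
    refine congrArg String.ofList ?_
    rw [PySem.List.foldl_append_if_eq_filter, List.nil_append, List.nil_append]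
    apply List.filter_congr
    intro c hc
    have hcp : c ∈ p := by
      have := hPperm.mem_iff.mp hc
      exact (PySem.Set.mem_ofList p c).mp this
    rw [if_pos hcp, if_pos hcp]
    by_cases hcl : c ∈ L
    · have h1 : 0 < L.count c := List.count_pos_iff.mpr hcl
      have hcE : c ∈ E := hEperm.mem_iff.mpr hcl
      rw [show ((!E.contains c)) = false by simp [List.contains_eq_mem, hcE]]
      rw [beq_eq_false_iff_ne]
      omega
    · have hcnt : L.count c = 0 := List.count_eq_zero.mpr hcl
      have hcE : c ∉ E := fun h => hcl (hEperm.mem_iff.mp h)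
      simp [hcnt, List.contains_eq_mem, hcE]
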